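-- pv_equiv track=rewrite | github.com/k4ntz/OC_Atari | ocatari/ram/qbert.py | _calc_enemy_x
-- ===== SOURCE A (Python) =====
-- def _calc_enemy_x(value):
--     """
--     Calculates the enemy x position from the RAM value
--     """
--     res = 0
--     for i in range(value + 1):
--         if i <= 1:
--             res = res + 13
--         elif i == 6:
--             res = res + 16
--         else:
--             res = res + 12
--     return res
-- ===== SOURCE B (Python) =====
-- def _calc_enemy_x(value):
--     """
--     Calculates the enemy x position from the RAM value (closed form).
--     """
--     n = value + 1
--     if n <= 0:
--         return 0
--     return 12 * n + min(n, 2) + (4 if n >= 7 else 0)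
-- ===== Notes on version B (the rewrite author's own statement) =====
-- stated objective: faster
-- what changed: Replaces the O(value) accumulation loop with a closed-form formula 12*n + min(n,2) + (4 if n>=7 else 0) for n = value+1.
import Mathlib
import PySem

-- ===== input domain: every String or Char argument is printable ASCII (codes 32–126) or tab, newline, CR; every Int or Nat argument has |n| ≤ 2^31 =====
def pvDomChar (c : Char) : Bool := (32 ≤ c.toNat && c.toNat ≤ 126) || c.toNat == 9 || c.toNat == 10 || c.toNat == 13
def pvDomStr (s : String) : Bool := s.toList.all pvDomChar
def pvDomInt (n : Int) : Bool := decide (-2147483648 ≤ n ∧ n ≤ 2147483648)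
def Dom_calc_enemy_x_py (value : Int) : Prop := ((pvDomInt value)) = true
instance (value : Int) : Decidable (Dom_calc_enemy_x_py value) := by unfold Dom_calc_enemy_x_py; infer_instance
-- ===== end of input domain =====

-- B replaces A's per-index accumulation loop with a closed-form formula (objective: faster).

-- ===== PORT A =====
def calc_enemy_x_py (value : Int) : Int :=
  (PySem.List.pyRange 0 (value + 1) 1).foldl
    (fun res i => if i ≤ 1 then res + 13 else if i = 6 then res + 16 else res + 12) 0

-- ===== PORT B =====
def calc_enemy_x_py_alt (value : Int) : Int :=
  let n := value + 1
  if n ≤ 0 then 0 else 12 * n + min n 2 + (if 7 ≤ n then 4 else 0)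

-- ===== PRECONDITION & SPEC =====
def Spec_calc_enemy_x_py (value : Int) (out : Int) : Prop := out = calc_enemy_x_py_alt value
instance (value : Int) (out : Int) : Decidable (Spec_calc_enemy_x_py value out) := by unfold Spec_calc_enemy_x_py; infer_instance

-- ===== CLAIM (what is proved, stated in full; the proofs are below) =====
def Claim_equal_calc_enemy_x_py : Prop := ∀ (value : Int), Dom_calc_enemy_x_py value → Spec_calc_enemy_x_py value (calc_enemy_x_py value)

-- ===== LEMMAS AND PROOFS =====

-- the loop over range(0, k) equals the closed form, by induction on k
theorem calc_enemy_x_closed (k : Nat) :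
    (PySem.List.pyRange 0 (k : Int) 1).foldl
      (fun res i => if i ≤ 1 then res + 13 else if i = 6 then res + 16 else res + 12) 0
    = 12 * (k : Int) + min (k : Int) 2 + (if (7 : Int) ≤ (k : Int) then 4 else 0) := by
  induction k with
  | zero => simp [PySem.List.pyRange_one_eq_nil]
  | succ m ih =>
    have h : (((m + 1 : Nat) : Int)) = (m : Int) + 1 := by push_cast; ring
    rw [h, PySem.List.pyRange_one_succ_right (by positivity), List.foldl_append, ih]
    simp only [List.foldl]
    split_ifs <;> omega

-- ===== VERDICT (by name: the statement is the Claim_ definition above) =====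
theorem calc_enemy_x_py_spec : Claim_equal_calc_enemy_x_py := by
  intro value _
  unfold Spec_calc_enemy_x_py calc_enemy_x_py calc_enemy_x_py_alt
  by_cases h : value + 1 ≤ 0
  · simp [PySem.List.pyRange_one_eq_nil h, h]
  · have hk : value + 1 = ((value + 1).toNat : Int) := by omega
    rw [hk, calc_enemy_x_closed]
    rw [if_neg (show ¬ (((value + 1).toNat : Int) ≤ 0) by omega)]
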